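-- pv_equiv track=rewrite | github.com/aorwall/moatless-tools | moatless/splitters/code_splitter_v2.py | get_line_number
-- ===== SOURCE A (Python) =====
-- def get_line_number(index: int, source_code: str) -> int:
--     total_chars = 0
--     line_number = 0
--     for line_number, line in enumerate(source_code.splitlines(keepends=True), start=1):
--         total_chars += len(line)
--         if total_chars > index:
--             return line_number - 1
--     return line_number
-- ===== SOURCE B (Python) =====
-- def get_line_number(index: int, source_code: str) -> int:
--     # Prefix array of cumulative line-end offsets + binary search (no linear scan w/ early return).
--     lines = source_code.splitlines(keepends=True)
--     prefix = []
--     total = 0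
--     for line in lines:
--         total += len(line)
--         prefix.append(total)
--     lo, hi = 0, len(prefix)
--     while lo < hi:
--         mid = (lo + hi) // 2
--         if prefix[mid] <= index:
--             lo = mid + 1
--         else:
--             hi = mid
--     return lo
-- ===== Notes on version B (the rewrite author's own statement) =====
-- stated objective: alternative
-- what changed: B replaces A's single linear scan with early return by building a prefix array of cumulative line-end offsets and locating the line with a hand-written binary search (bisect_right).
import Mathlib
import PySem

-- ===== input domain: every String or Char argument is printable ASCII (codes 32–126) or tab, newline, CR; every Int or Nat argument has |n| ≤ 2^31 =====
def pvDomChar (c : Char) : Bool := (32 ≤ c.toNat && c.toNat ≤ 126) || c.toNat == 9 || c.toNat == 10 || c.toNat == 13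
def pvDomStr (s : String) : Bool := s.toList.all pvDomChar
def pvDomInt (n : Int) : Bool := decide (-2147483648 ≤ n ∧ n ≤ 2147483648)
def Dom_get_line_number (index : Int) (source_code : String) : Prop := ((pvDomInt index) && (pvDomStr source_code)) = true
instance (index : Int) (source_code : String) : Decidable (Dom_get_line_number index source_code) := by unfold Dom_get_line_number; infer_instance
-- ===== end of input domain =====

-- B builds a prefix array of cumulative line-end offsets and binary-searches it instead of A's linear scan with early return.

-- ===== PORT A =====
-- str.splitlines(keepends=True), ported by hand (PySem.Str.splitlines drops the ends);
-- exact on the input domain, whose only line boundaries are '\n', '\r' and '\r\n'.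
def splitKeep : List Char → List Char → List (List Char)
  | acc, [] => if acc = [] then [] else [acc.reverse]
  | acc, '\n' :: rest => (acc.reverse ++ ['\n']) :: splitKeep [] rest
  | acc, '\r' :: '\n' :: rest => (acc.reverse ++ ['\r', '\n']) :: splitKeep [] rest
  | acc, '\r' :: rest => (acc.reverse ++ ['\r']) :: splitKeep [] rest
  | acc, c :: rest => splitKeep (c :: acc) rest

-- A's for-loop over enumerate(..., start=1): state = (total_chars, line_number)
def aLoop (index : Int) : List (List Char) → Int → Int → Int
  | [], _, line_number => line_number
  | line :: rest, total_chars, line_number =>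
    let total_chars' := total_chars + (line.length : Int)
    let line_number' := line_number + 1
    if total_chars' > index then line_number' - 1
    else aLoop index rest total_chars' line_number'

def get_line_number (index : Int) (source_code : String) : Int :=
  aLoop index (splitKeep [] source_code.toList) 0 0

-- ===== PORT B =====
-- Source B's while-loop: lo/hi binary search over the prefix array
-- (lo, hi, mid are list indices, hence Nat; (lo+hi)//2 on nonnegatives = Nat division;
--  pfx[mid]: mid < hi ≤ len(pfx) throughout, so Python never raises — getD is exact here)
def bsLoop (pfx : List Int) (index : Int) (lo hi : Nat) : Nat :=
  if h : lo < hi then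
    let mid := (lo + hi) / 2
    if pfx.getD mid 0 ≤ index then bsLoop pfx index (mid + 1) hi
    else bsLoop pfx index lo mid
  else lo
termination_by hi - lo
decreasing_by all_goals omega

def get_line_number_alt (index : Int) (source_code : String) : Int :=
  let lines := splitKeep [] source_code.toList
  -- Source B's append loop building the prefix array, as a fold over (pfx, total)
  let pfx := (lines.foldl (fun (st : List Int × Int) line =>
      (st.1 ++ [st.2 + (line.length : Int)], st.2 + (line.length : Int))) ([], 0)).1
  (bsLoop pfx index 0 pfx.length : Int)

-- ===== PRECONDITION & SPEC =====
def Spec_get_line_number (index : Int) (source_code : String) (out : Int) : Prop := out = get_line_number_alt index source_code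
instance (index : Int) (source_code : String) (out : Int) : Decidable (Spec_get_line_number index source_code out) := by unfold Spec_get_line_number; infer_instance

-- ===== CLAIM (what is proved, stated in full; the proofs are below) =====
def Claim_equal_get_line_number : Prop := ∀ (index : Int) (source_code : String), Dom_get_line_number index source_code → Spec_get_line_number index source_code (get_line_number index source_code)

-- ===== LEMMAS AND PROOFS =====

-- cumulative sums of the line lengths, starting from t (proof-side reference object)
def psFrom (t : Int) : List (List Char) → List Int
  | [] => []
  | l :: r => (t + (l.length : Int)) :: psFrom (t + (l.length : Int)) r

theorem psFrom_lb (ls : List (List Char)) : ∀ (t : Int) (p : Int), p ∈ psFrom t ls → t ≤ p := by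
  induction ls with
  | nil => intro t p hp; simp [psFrom] at hp
  | cons l r ih =>
    intro t p hp
    simp only [psFrom, List.mem_cons] at hp
    rcases hp with h | h
    · omega
    · have := ih (t + (l.length : Int)) p h; omega

theorem foldl_prefix (ls : List (List Char)) : ∀ (acc : List Int) (t : Int),
    (ls.foldl (fun (st : List Int × Int) line =>
      (st.1 ++ [st.2 + (line.length : Int)], st.2 + (line.length : Int))) (acc, t)).1
      = acc ++ psFrom t ls := by
  induction ls with
  | nil => intro acc t; simp [psFrom]
  | cons l r ih =>
    intro acc t
    simp only [List.foldl_cons, psFrom]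
    rw [ih]
    simp

-- A's scan computes line_number + (number of cumulative offsets ≤ index)
theorem aLoop_eq (index : Int) (ls : List (List Char)) : ∀ (t ln : Int),
    aLoop index ls t ln = ln + ((psFrom t ls).countP (fun p => decide (p ≤ index)) : Int) := by
  induction ls with
  | nil => intro t ln; simp [aLoop, psFrom]
  | cons l r ih =>
    intro t ln
    simp only [aLoop, psFrom]
    by_cases h : t + (l.length : Int) > index
    · simp only [if_pos h]
      have hz : (psFrom (t + (l.length : Int)) r).countP (fun p => decide (p ≤ index)) = 0 := by
        rw [List.countP_eq_zero]
        intro p hp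
        have := psFrom_lb r (t + (l.length : Int)) p hp
        simp; omega
      rw [List.countP_cons]
      simp only [hz]
      have : ¬ (t + (l.length : Int) ≤ index) := by omega
      simp [this]
    · simp only [if_neg h]
      rw [ih, List.countP_cons]
      have : (t + (l.length : Int) ≤ index) := by omega
      simp [this]
      omega

-- On a list of nondecreasing values, positions below countP(· ≤ x) satisfy the bound and positions at/above fail it
theorem sorted_countP_lt {xs : List Int} {x : Int}
    (hs : xs.Pairwise (· ≤ ·)) :
    ∀ j, j < xs.length →
      (xs.getD j 0 ≤ x ↔ j < xs.countP (fun p => decide (p ≤ x))) := by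
  induction xs with
  | nil => intro j hj; simp at hj
  | cons a r ih =>
    intro j hj
    rw [List.pairwise_cons] at hs
    rw [List.countP_cons]
    by_cases ha : a ≤ x
    · cases j with
      | zero => simp [ha]
      | succ k =>
        simp only [List.getD_cons_succ]
        have := ih hs.2 k (by simpa using hj)
        simp [ha] at this ⊢
        omega
    · -- a > x: all later elements are ≥ a > x, so countP = 0
      have hz : r.countP (fun p => decide (p ≤ x)) = 0 := by
        rw [List.countP_eq_zero]
        intro p hp
        have := hs.1 p hp
        simp; omega
      cases j with
      | zero => simp [ha, hz]
      | succ k =>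
        simp only [List.getD_cons_succ]
        have hk : k < r.length := by simpa using hj
        constructor
        · intro hle
          exfalso
          have hmem : r.getD k 0 ∈ r := by
            rw [List.getD_eq_getElem _ _ hk]; exact List.getElem_mem hk
          have := hs.1 _ hmem
          omega
        · intro hlt; simp [ha, hz] at hlt

theorem psFrom_pairwise (ls : List (List Char)) : ∀ t : Int, (psFrom t ls).Pairwise (· ≤ ·) := by
  induction ls with
  | nil => intro t; simp [psFrom]
  | cons l r ih =>
    intro t
    simp only [psFrom, List.pairwise_cons]
    exact ⟨fun p hp => psFrom_lb r _ p hp, ih _⟩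

-- the binary search returns exactly countP(· ≤ index) on a sorted prefix array
theorem bsLoop_eq (pfx : List Int) (index : Int)
    (hs : pfx.Pairwise (· ≤ ·)) :
    ∀ lo hi, hi ≤ pfx.length →
      lo ≤ pfx.countP (fun p => decide (p ≤ index)) →
      pfx.countP (fun p => decide (p ≤ index)) ≤ hi →
      bsLoop pfx index lo hi = pfx.countP (fun p => decide (p ≤ index)) := by
  intro lo hi
  induction hlh : hi - lo using Nat.strong_induction_on generalizing lo hi with
  | _ n ih =>
    intro hhi hloc hchi
    rw [bsLoop]
    by_cases h : lo < hi
    · simp only [dif_pos h]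
      set mid := (lo + hi) / 2 with hmid
      have hmlt : mid < hi := by omega
      have hmlo : lo ≤ mid := by omega
      have hmlen : mid < pfx.length := by omega
      have hiff := sorted_countP_lt (x := index) hs mid hmlen
      by_cases hp : pfx.getD mid 0 ≤ index
      · simp only [if_pos hp]
        have : mid < pfx.countP (fun p => decide (p ≤ index)) := hiff.mp hp
        exact ih (hi - (mid + 1)) (by omega) (mid + 1) hi rfl hhi (by omega) hchi
      · simp only [if_neg hp]
        have : ¬ (mid < pfx.countP (fun p => decide (p ≤ index))) := fun hc => hp (hiff.mpr hc)
        exact ih (mid - lo) (by omega) lo mid rfl (by omega) hloc (by omega)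
    · simp only [dif_neg h]
      omega

-- ===== VERDICT (by name: the statement is the Claim_ definition above) =====
theorem get_line_number_spec : Claim_equal_get_line_number := by
  intro index source_code _
  unfold Spec_get_line_number get_line_number get_line_number_alt
  simp only []
  rw [foldl_prefix, List.nil_append]
  set ls := splitKeep [] source_code.toList
  have hc : (psFrom 0 ls).countP (fun p => decide (p ≤ index)) ≤ (psFrom 0 ls).length :=
    List.countP_le_length
  rw [aLoop_eq, bsLoop_eq (psFrom 0 ls) index (psFrom_pairwise ls 0) 0 (psFrom 0 ls).length
      le_rfl (Nat.zero_le _) hc]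
  simp
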